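-- pv_equiv track=rewrite | github.com/Daejjyu/Algorithm | Programmers/pro_84021_3주차_퍼즐 조각 채우기.py | solution
-- ===== SOURCE A (Python) =====
-- from collections import deque
-- import copy
--
-- dx=[-1,1,0,0]
--
-- dy=[0,0,-1,1]
--
-- def bfs(x,y,N,visited,array,check):
--     space=[]
--     que=deque()
--     que.append([x,y])
--     space.append([x,y])
--     visited[x][y] = True
--     while que:
--         px,py =que.popleft()
--         for i in range(4):
--             nx=px+dx[i]
--             ny=py+dy[i]
--             if nx<0 or ny<0 or nx>=N or ny>=N:
--                 continue
--             if visited[nx][ny]==False and array[nx][ny]==check: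
--                 visited[nx][ny]=True
--                 que.append([nx,ny])
--                 space.append([nx,ny])
--     return sorted(space)
--
-- def rotate(b,N):
--     new_board=[[block[1],N-1-block[0]] for block in b]
--     return new_board
--
-- def standard(b,N):
--     minx=min([x[0] for x in b])
--     miny=min([x[1] for x in b])
--     change=[[x[0]-minx,x[1]-miny] for x in b]
--     return sorted(change)
--
-- def solution(game_board, table):
--     answer=0
--     N=len(game_board)
--     game_block=[]
--     table_block=[]
--     visited_g = [[False for _ in range(N)] for _ in range(N)]
--     visited_t = [[False for _ in range(N)] for _ in range(N)]
--
--     for i in range(N):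
--         for j in range(N):
--             if game_board[i][j]==0 and visited_g[i][j]==False:
--                 game_block.append(standard(bfs(i,j,N,visited_g,game_board,0),N))
--             if table[i][j]==1 and visited_t[i][j]==False:
--                 table_block.append(standard(bfs(i,j,N,visited_t,table,1),N))
--             else:
--                 continue
--
--     for g_block in game_block:
--         if g_block in table_block:
--             answer+=len(g_block)
--             table_block.remove(g_block)
--         else:
--             flag=False
--             for t_block in table_block:
--                 temp=copy.copy(t_block)
--                 for z in range(4):
--                     if g_block==temp:
--                         answer+=len(g_block)
--                         table_block.remove(t_block)
--                         flag=True
--                         break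
--                     temp=standard(rotate(temp,N),N)
--                 if flag:
--                     break
--     return answer
-- ===== SOURCE B (Python) =====
-- from collections import deque, Counter
--
--
-- def _bfs(x, y, n, seen, board, val):
--     space = []
--     que = deque()
--     que.append([x, y])
--     space.append([x, y])
--     seen[x][y] = True
--     while que:
--         px, py = que.popleft()
--         for dx, dy in ((-1, 0), (1, 0), (0, -1), (0, 1)):
--             nx = px + dx
--             ny = py + dy
--             if nx < 0 or ny < 0 or nx >= n or ny >= n:
--                 continue
--             if seen[nx][ny] == False and board[nx][ny] == val:
--                 seen[nx][ny] = True
--                 que.append([nx, ny])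
--                 space.append([nx, ny])
--     return sorted(space)
--
--
-- def _normalize(b):
--     mx = min([p[0] for p in b])
--     my = min([p[1] for p in b])
--     return sorted([[p[0] - mx, p[1] - my] for p in b])
--
--
-- def _blocks(board, val, n):
--     seen = [[False for _ in range(n)] for _ in range(n)]
--     out = []
--     for i in range(n):
--         for j in range(n):
--             if board[i][j] == val and seen[i][j] == False:
--                 out.append(_normalize(_bfs(i, j, n, seen, board, val)))
--     return out
--
--
-- def _canon(b):
--     forms = []
--     cur = b
--     for _ in range(4):
--         forms.append(tuple(v for p in cur for v in p))
--         cur = _normalize([[p[1], -p[0]] for p in cur])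
--     return min(forms)
--
--
-- def solution(game_board, table):
--     n = len(game_board)
--     cnt = Counter(_canon(t) for t in _blocks(table, 1, n))
--     answer = 0
--     for g in _blocks(game_board, 0, n):
--         k = _canon(g)
--         if cnt[k] > 0:
--             cnt[k] -= 1
--             answer += len(g)
--     return answer
-- ===== Notes on version B (the rewrite author's own statement) =====
-- stated objective: faster
-- what changed: The quadratic matching loop (for every game block, rescan all remaining table blocks trying 4 rotations, list.remove on hit) is replaced by a rotation-invariant canonical key (lexicographic minimum of the 4 normalized rotations) with a Counter: table blocks are hashed once and each game block does one dict lookup/decrement.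
import Mathlib
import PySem

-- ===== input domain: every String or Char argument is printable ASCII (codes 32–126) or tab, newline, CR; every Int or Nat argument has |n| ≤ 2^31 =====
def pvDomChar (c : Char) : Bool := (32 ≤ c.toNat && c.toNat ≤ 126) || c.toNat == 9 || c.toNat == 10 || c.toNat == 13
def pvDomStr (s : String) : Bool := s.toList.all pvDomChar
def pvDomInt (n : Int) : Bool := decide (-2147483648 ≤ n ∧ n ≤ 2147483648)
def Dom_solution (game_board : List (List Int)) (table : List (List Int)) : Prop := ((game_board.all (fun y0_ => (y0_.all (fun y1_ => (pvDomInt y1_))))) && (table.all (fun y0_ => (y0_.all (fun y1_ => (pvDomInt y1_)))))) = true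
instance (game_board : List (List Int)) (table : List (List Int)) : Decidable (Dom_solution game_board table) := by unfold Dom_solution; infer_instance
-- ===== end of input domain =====

-- B replaces A's quadratic match loop (rescan all remaining table blocks, 4 rotations each,
-- list.remove on hit) by a rotation-invariant canonical key counted in a dict: faster matching.

-- ===== PORT A =====
-- Python compares the cell lists [x, y] lexicographically; `keyP` is that comparison key.
def keyP (p : Int × Int) : List Int := [p.1, p.2]

-- Python `min(list)` on a list of ints (every call site below passes a nonempty list)
def pymin (l : List Int) : Int := (PySem.List.min? l (fun v => v)).getD 0

-- Board/visited indexing: every index either program reads is nonnegative and (under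
-- Pre_solution) in range, where `getD`/`toNat` is exactly Python's `l[i][j]` / assignment.
def visGet (V : List (List Bool)) (x y : Int) : Bool := (V.getD x.toNat []).getD y.toNat false
def visSet (V : List (List Bool)) (x y : Int) : List (List Bool) :=
  V.set x.toNat ((V.getD x.toNat []).set y.toNat true)
def boardGet (A : List (List Int)) (x y : Int) : Int := (A.getD x.toNat []).getD y.toNat 0

-- dx = [-1,1,0,0], dy = [0,0,-1,1] read in loop order i = 0..3
def dirs : List (Int × Int) := [(-1, 0), (1, 0), (0, -1), (0, 1)]

-- one iteration of A's `while que:` body, state = (visited, que-after-pop, space)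
def bfsStep (N : Int) (array : List (List Int)) (check px py : Int)
    (s : List (List Bool) × List (Int × Int) × List (Int × Int)) :
    List (List Bool) × List (Int × Int) × List (Int × Int) :=
  dirs.foldl (fun s d =>
    let nx := px + d.1
    let ny := py + d.2
    if nx < 0 ∨ ny < 0 ∨ N ≤ nx ∨ N ≤ ny then s
    else if visGet s.1 nx ny = false ∧ boardGet array nx ny = check then
      (visSet s.1 nx ny, s.2.1 ++ [(nx, ny)], s.2.2 ++ [(nx, ny)])
    else s) s

-- A's `while que:` loop. Fuel bound: each iteration pops one queue element and every enqueue
-- turns a visited cell from false to true, so at most 1 + N*N iterations ever run.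
def bfsLoop (N : Int) (array : List (List Int)) (check : Int) :
    Nat → List (List Bool) → List (Int × Int) → List (Int × Int) →
    List (List Bool) × List (Int × Int)
  | 0, V, _, space => (V, space)
  | fuel + 1, V, que, space =>
    match que with
    | [] => (V, space)
    | (px, py) :: rest =>
      let s := bfsStep N array check px py (V, rest, space)
      bfsLoop N array check fuel s.1 s.2.1 s.2.2

-- Python's bfs mutates `visited` in place; the port returns (visited', sorted(space)).
def bfs (x y N : Int) (visited : List (List Bool)) (array : List (List Int)) (check : Int) :
    List (List Bool) × List (Int × Int) :=
  let visited := visSet visited x y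
  let r := bfsLoop N array check (N.toNat * N.toNat + 2) visited [(x, y)] [(x, y)]
  (r.1, PySem.List.sorted r.2 keyP)

def rotate (b : List (Int × Int)) (N : Int) : List (Int × Int) :=
  b.map (fun p => (p.2, N - 1 - p.1))

-- A's `standard(b, N)` never uses N; the parameter is dropped.
def standard (b : List (Int × Int)) : List (Int × Int) :=
  PySem.List.sorted (b.map (fun q =>
    (q.1 - pymin (b.map (fun q => q.1)), q.2 - pymin (b.map (fun q => q.2))))) keyP

-- the body of A's cell double loop for one board (A runs the game- and table- copy of this
-- side by side on independent state components); state = (visited, collected blocks)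
def extractStep (board : List (List Int)) (check N : Int)
    (s : List (List Bool) × List (List (Int × Int))) (c : Int × Int) :
    List (List Bool) × List (List (Int × Int)) :=
  if boardGet board c.1 c.2 = check ∧ visGet s.1 c.1 c.2 = false then
    let r := bfs c.1 c.2 N s.1 board check
    (r.1, s.2 ++ [standard r.2])
  else s

-- `for z in range(4): if g == temp: … ; temp = standard(rotate(temp, N), N)`
def tryRot (N : Int) (g : List (Int × Int)) : Nat → List (Int × Int) → Bool
  | 0, _ => false
  | z + 1, temp => if g = temp then true else tryRot N g z (standard (rotate temp N))

-- `for t_block in table_block:` with the flag/break structure: first t that matches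
def scanT (N : Int) (g : List (Int × Int)) : List (List (Int × Int)) → Option (List (Int × Int))
  | [] => none
  | t :: rest => if tryRot N g 4 t then some t else scanT N g rest

def solution (game_board : List (List Int)) (table : List (List Int)) : Int :=
  let N : Int := PySem.List.len game_board
  let initV := List.replicate N.toNat (List.replicate N.toNat false)
  let st := (PySem.List.pyRange 0 N 1).foldl (fun s i =>
      (PySem.List.pyRange 0 N 1).foldl (fun s j =>
        (extractStep game_board 0 N s.1 (i, j), extractStep table 1 N s.2 (i, j))) s)
    ((initV, []), (initV, []))
  let game_block := st.1.2
  let table_block := st.2.2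
  (game_block.foldl (fun (s : Int × List (List (Int × Int))) g =>
      if s.2.contains g then (s.1 + (g.length : Int), (PySem.List.remove? s.2 g).getD s.2)
      else
        match scanT N g s.2 with
        | some t => (s.1 + (g.length : Int), (PySem.List.remove? s.2 t).getD s.2)
        | none => s) (0, table_block)).1

-- ===== PORT B =====
-- Source B's `_bfs`/`_normalize` are line-identical to A's `bfs`/`standard`, so they port to the
-- same helpers `bfs`/`standard`; `_blocks(board, val, n)` is B's own per-board double loop.
def blocksOf (board : List (List Int)) (check N : Int) : List (List (Int × Int)) :=
  ((PySem.List.pyRange 0 N 1).foldl (fun s i =>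
      (PySem.List.pyRange 0 N 1).foldl (fun s j => extractStep board check N s (i, j)) s)
    (List.replicate N.toNat (List.replicate N.toNat false), [])).2

-- B's rotation drops the `N - 1` offset; `_normalize` re-translates to the origin anyway.
def rotB (b : List (Int × Int)) : List (Int × Int) := b.map (fun p => (p.2, -p.1))

-- flattened tuple key `tuple(v for p in cur for v in p)`; Python compares tuples lexicographically
def flat (b : List (Int × Int)) : List Int := b.flatMap (fun p => [p.1, p.2])

-- `min(forms)` over the 4 normalized rotations of b
def canon (b : List (Int × Int)) : List Int :=
  let f0 := flat b
  let b1 := standard (rotB b)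
  let b2 := standard (rotB b1)
  let b3 := standard (rotB b2)
  [flat b1, flat b2, flat b3].foldl (fun m f => if f < m then f else m) f0

def solution_alt (game_board : List (List Int)) (table : List (List Int)) : Int :=
  let N : Int := PySem.List.len game_board
  let cnt := PySem.Dict.counter ((blocksOf table 1 N).map canon)
  ((blocksOf game_board 0 N).foldl
    (fun (s : Int × PySem.Dict (List Int) Int) g =>
      let k := canon g
      if 0 < s.2.getD k 0 then (s.1 + (g.length : Int), s.2.insert k (s.2.getD k 0 - 1))
      else s) (0, cnt)).1

-- ===== PRECONDITION & SPEC =====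
-- Exactly the inputs on which Python A returns (no IndexError): A reads game_board[i][j] and
-- table[i][j] for all i, j < len(game_board), so each game_board row, the table, and the
-- first len(game_board) table rows must have length ≥ len(game_board).
def Pre_solution (game_board : List (List Int)) (table : List (List Int)) : Prop :=
  (∀ r ∈ game_board, game_board.length ≤ r.length) ∧
  game_board.length ≤ table.length ∧
  (∀ r ∈ table.take game_board.length, game_board.length ≤ r.length)
instance (game_board : List (List Int)) (table : List (List Int)) :
    Decidable (Pre_solution game_board table) := by unfold Pre_solution; infer_instance

def pvWitness_solution : List (List Int) × List (List Int) := ([[0, 0], [1, 0]], [[1, 1], [0, 1]])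

def Spec_solution (game_board : List (List Int)) (table : List (List Int)) (out : Int) : Prop :=
  out = solution_alt game_board table
instance (game_board : List (List Int)) (table : List (List Int)) (out : Int) :
    Decidable (Spec_solution game_board table out) := by unfold Spec_solution; infer_instance

-- ===== CLAIM (what is proved, stated in full; the proofs are below) =====
def Claim_equal_solution : Prop := ∀ (game_board : List (List Int)) (table : List (List Int)),
  Dom_solution game_board table → Pre_solution game_board table →
  Spec_solution game_board table (solution game_board table)

-- ===== LEMMAS AND PROOFS =====

-- abbreviations used only by the proofs
def R (b : List (Int × Int)) : List (Int × Int) := standard (rotB b)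
def lmax (l : List Int) : Int := (PySem.List.max? l (fun v => v)).getD 0

-- the shape of every block either port collects: nonempty, strictly sorted, translated to 0
def Std (b : List (Int × Int)) : Prop :=
  b ≠ [] ∧ b.Pairwise (fun p q => keyP p < keyP q) ∧
  pymin (b.map (fun q => q.1)) = 0 ∧ pymin (b.map (fun q => q.2)) = 0

theorem pymin_spec {l : List Int} (h : l ≠ []) : pymin l ∈ l ∧ ∀ x ∈ l, pymin l ≤ x := by
  unfold pymin
  cases hm : PySem.List.min? l (fun v => v) with
  | none => exact absurd ((PySem.List.min?_eq_none_iff l _).mp hm) h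
  | some m =>
    refine ⟨by simpa using PySem.List.min?_mem hm, ?_⟩
    intro x hx
    simpa using PySem.List.min?_isMin hm x hx

theorem lmax_spec {l : List Int} (h : l ≠ []) : lmax l ∈ l ∧ ∀ x ∈ l, x ≤ lmax l := by
  unfold lmax
  cases hm : PySem.List.max? l (fun v => v) with
  | none => exact absurd ((PySem.List.max?_eq_none_iff l _).mp hm) h
  | some m =>
    refine ⟨by simpa using PySem.List.max?_mem hm, ?_⟩
    intro x hx
    simpa using PySem.List.max?_isMax hm x hx

theorem pymin_eq_of {l : List Int} {m : Int} (hm : m ∈ l) (hb : ∀ x ∈ l, m ≤ x) :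
    pymin l = m := by
  obtain ⟨h1, h2⟩ := pymin_spec (List.ne_nil_of_mem hm)
  exact le_antisymm (h2 m hm) (hb _ h1)

theorem lmax_eq_of {l : List Int} {m : Int} (hm : m ∈ l) (hb : ∀ x ∈ l, x ≤ m) :
    lmax l = m := by
  obtain ⟨h1, h2⟩ := lmax_spec (List.ne_nil_of_mem hm)
  exact le_antisymm (hb _ h1) (h2 m hm)

theorem pymin_perm {l l' : List Int} (hp : l.Perm l') : pymin l = pymin l' := by
  rcases eq_or_ne l [] with rfl | hne
  · rw [hp.symm.eq_nil]
  · obtain ⟨h1, h2⟩ := pymin_spec hne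
    exact (pymin_eq_of (hp.mem_iff.mp h1) (fun x hx => h2 x (hp.mem_iff.mpr hx))).symm

theorem lmax_perm {l l' : List Int} (hp : l.Perm l') : lmax l = lmax l' := by
  rcases eq_or_ne l [] with rfl | hne
  · rw [hp.symm.eq_nil]
  · obtain ⟨h1, h2⟩ := lmax_spec hne
    exact (lmax_eq_of (hp.mem_iff.mp h1) (fun x hx => h2 x (hp.mem_iff.mpr hx))).symm

theorem pymin_map_add {l : List Int} (h : l ≠ []) (c : Int) :
    pymin (l.map (fun x => x + c)) = pymin l + c := by
  apply pymin_eq_of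
  · exact List.mem_map.mpr ⟨_, (pymin_spec h).1, rfl⟩
  · intro x hx
    obtain ⟨y, hy, rfl⟩ := List.mem_map.mp hx
    have := (pymin_spec h).2 y hy
    omega

theorem pymin_map_const_sub {l : List Int} (h : l ≠ []) (c : Int) :
    pymin (l.map (fun x => c - x)) = c - lmax l := by
  apply pymin_eq_of
  · exact List.mem_map.mpr ⟨_, (lmax_spec h).1, rfl⟩
  · intro x hx
    obtain ⟨y, hy, rfl⟩ := List.mem_map.mp hx
    have := (lmax_spec h).2 y hy
    omega

theorem lmax_map_const_sub {l : List Int} (h : l ≠ []) (c : Int) :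
    lmax (l.map (fun x => c - x)) = c - pymin l := by
  apply lmax_eq_of
  · exact List.mem_map.mpr ⟨_, (pymin_spec h).1, rfl⟩
  · intro x hx
    obtain ⟨y, hy, rfl⟩ := List.mem_map.mp hx
    have := (pymin_spec h).2 y hy
    omega

theorem keyP_inj {p q : Int × Int} (h : keyP p = keyP q) : p = q := by
  cases p; cases q
  simp only [keyP, List.cons.injEq, and_true] at h
  simp [h.1, h.2]

theorem standard_perm (b : List (Int × Int)) :
    (standard b).Perm (b.map (fun q =>
      (q.1 - pymin (b.map (fun q => q.1)), q.2 - pymin (b.map (fun q => q.2))))) := by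
  unfold standard
  exact PySem.List.sorted_perm _ _ _

-- `PySem.List.sorted` does not depend on which DecidableLT instance decides the comparisons
theorem sorted_dec_irrel {α κ : Type} [LT κ] (d1 d2 : DecidableLT κ) (xs : List α)
    (key : α → κ) (rev : Bool) :
    @PySem.List.sorted α κ _ d1 xs key rev = @PySem.List.sorted α κ _ d2 xs key rev := by
  have h : d1 = d2 := by
    funext a b
    exact Subsingleton.elim _ _
  rw [h]

theorem standard_pairwise (b : List (Int × Int)) :
    (standard b).Pairwise (fun p q => keyP p ≤ keyP q) := by
  have h := PySem.List.sorted_pairwise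
    (b.map (fun q =>
      (q.1 - pymin (b.map (fun q => q.1)), q.2 - pymin (b.map (fun q => q.2))))) keyP
  rw [sorted_dec_irrel _ (fun a b => a.decidableLT b)] at h
  exact h

theorem nodup_of_pairwise_lt {b : List (Int × Int)}
    (h : b.Pairwise (fun p q => keyP p < keyP q)) : b.Nodup := by
  refine h.imp ?_
  intro a c hac he
  subst he
  exact lt_irrefl _ hac

theorem pairwise_lt_of_sorted_nodup {b : List (Int × Int)}
    (h1 : b.Pairwise (fun p q => keyP p ≤ keyP q)) (h2 : b.Nodup) :
    b.Pairwise (fun p q => keyP p < keyP q) := by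
  refine (h1.and h2).imp ?_
  intro p q hpq
  exact lt_of_le_of_ne hpq.1 (fun he => hpq.2 (keyP_inj he))

theorem tr_inj (m1 m2 : Int) :
    Function.Injective (fun p : Int × Int => (p.1 - m1, p.2 - m2)) := by
  intro p q h
  cases p; cases q
  simp only [Prod.mk.injEq] at h ⊢
  omega

theorem standard_std {b : List (Int × Int)} (hne : b ≠ []) (hnd : b.Nodup) :
    Std (standard b) := by
  have hperm := standard_perm b
  have hmapne : b.map (fun q =>
      (q.1 - pymin (b.map (fun q => q.1)), q.2 - pymin (b.map (fun q => q.2)))) ≠ [] := by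
    simpa using hne
  have hndm : (b.map (fun q =>
      (q.1 - pymin (b.map (fun q => q.1)), q.2 - pymin (b.map (fun q => q.2))))).Nodup :=
    hnd.map (tr_inj _ _)
  refine ⟨?_, ?_, ?_, ?_⟩
  · intro h0
    rw [h0] at hperm
    exact hmapne hperm.symm.eq_nil
  · exact pairwise_lt_of_sorted_nodup (standard_pairwise b) (hperm.nodup_iff.mpr hndm)
  · rw [pymin_perm (hperm.map (fun q => q.1))]
    have e2 : ((b.map (fun q =>
        (q.1 - pymin (b.map (fun q => q.1)), q.2 - pymin (b.map (fun q => q.2))))).map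
          (fun q => q.1)) =
        (b.map (fun q => q.1)).map (fun x => x + -(pymin (b.map (fun q => q.1)))) := by
      simp only [List.map_map]
      rfl
    rw [e2, pymin_map_add (by simpa using hne)]
    omega
  · rw [pymin_perm (hperm.map (fun q => q.2))]
    have e2 : ((b.map (fun q =>
        (q.1 - pymin (b.map (fun q => q.1)), q.2 - pymin (b.map (fun q => q.2))))).map
          (fun q => q.2)) =
        (b.map (fun q => q.2)).map (fun x => x + -(pymin (b.map (fun q => q.2)))) := by
      simp only [List.map_map]
      rfl
    rw [e2, pymin_map_add (by simpa using hne)]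
    omega

theorem R_perm {b : List (Int × Int)} (h : b ≠ []) :
    (R b).Perm (b.map (fun p =>
      (p.2 - pymin (b.map (fun q => q.2)), lmax (b.map (fun q => q.1)) - p.1))) := by
  have hperm := standard_perm (rotB b)
  have e1 : ((rotB b).map (fun q => q.1)) = b.map (fun q => q.2) := by
    simp [rotB, List.map_map]
  have e2 : ((rotB b).map (fun q => q.2)) = (b.map (fun q => q.1)).map (fun x => 0 - x) := by
    simp only [rotB, List.map_map]
    congr 1
    funext p
    dsimp only [Function.comp]
    omega
  rw [e1, e2, pymin_map_const_sub (by simpa using h) 0] at hperm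
  refine hperm.trans ?_
  have e3 : ((rotB b).map (fun p =>
      (p.1 - pymin (b.map (fun q => q.2)), p.2 - (0 - lmax (b.map (fun q => q.1)))))) =
      b.map (fun p =>
        (p.2 - pymin (b.map (fun q => q.2)), lmax (b.map (fun q => q.1)) - p.1)) := by
    simp only [rotB, List.map_map]
    congr 1
    funext p
    obtain ⟨u, v⟩ := p
    simp only [Function.comp_apply, Prod.mk.injEq, true_and]
    try omega
  rw [e3]

theorem R_std {b : List (Int × Int)} (h : Std b) : Std (R b) := by
  obtain ⟨hne, hpw, _, _⟩ := h
  have hnd := nodup_of_pairwise_lt hpw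
  refine standard_std (by simpa [rotB] using hne) ?_
  refine hnd.map ?_
  intro p q hpq
  cases p; cases q
  simp only [Prod.mk.injEq] at hpq ⊢
  omega

theorem R_perm_of_perm {b c : List (Int × Int)} {f : (Int × Int) → (Int × Int)} (hb : b ≠ [])
    (hc : c.Perm (b.map f)) :
    (R c).Perm (b.map (fun p => ((f p).2 - pymin (b.map (fun q => (f q).2)),
                                  lmax (b.map (fun q => (f q).1)) - (f p).1))) := by
  have hmne : b.map f ≠ [] := by simpa using hb
  have hcne : c ≠ [] := by
    intro h0
    rw [h0] at hc
    exact hmne hc.symm.eq_nil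
  have h1 := R_perm hcne
  have e1 : pymin (c.map (fun q => q.2)) = pymin (b.map (fun q => (f q).2)) := by
    rw [pymin_perm (hc.map (fun q => q.2)), List.map_map]
    rfl
  have e2 : lmax (c.map (fun q => q.1)) = lmax (b.map (fun q => (f q).1)) := by
    rw [lmax_perm (hc.map (fun q => q.1)), List.map_map]
    rfl
  rw [e1, e2] at h1
  refine h1.trans ?_
  have h2 := hc.map (fun p =>
    (p.2 - pymin (b.map (fun q => (f q).2)), lmax (b.map (fun q => (f q).1)) - p.1))
  refine h2.trans ?_
  rw [List.map_map]
  rfl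

theorem standard_eq_of_perm {x y : List (Int × Int)} (hp : (standard x).Perm y)
    (hy : y.Pairwise (fun p q => keyP p < keyP q)) : standard x = y := by
  have hyx : y.Perm (x.map (fun q =>
      (q.1 - pymin (x.map (fun q => q.1)), q.2 - pymin (x.map (fun q => q.2))))) :=
    hp.symm.trans (standard_perm x)
  have h := PySem.List.sorted_eq_of_perm_of_pairwise_lt _ y keyP hyx hy
  rw [sorted_dec_irrel _ (fun a b => a.decidableLT b)] at h
  exact h

theorem R4_id {b : List (Int × Int)} (h : Std b) : R (R (R (R b))) = b := by
  obtain ⟨hne, hpw, hm1, hm2⟩ := h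
  have hfne : b.map (fun q => q.1) ≠ [] := by simpa using hne
  have hsne : b.map (fun q => q.2) ≠ [] := by simpa using hne
  have P1 : (R b).Perm (b.map (fun p => (p.2, lmax (b.map (fun q => q.1)) - p.1))) := by
    have h1 := R_perm hne
    rw [hm2] at h1
    refine h1.trans ?_
    have e : (b.map (fun p => (p.2 - 0, lmax (b.map (fun q => q.1)) - p.1))) =
        b.map (fun p => (p.2, lmax (b.map (fun q => q.1)) - p.1)) := by
      congr 1
      funext p
      simp
    rw [e]
  have P2 : (R (R b)).Perm (b.map (fun p =>
      (lmax (b.map (fun q => q.1)) - p.1, lmax (b.map (fun q => q.2)) - p.2))) := by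
    have h2 := R_perm_of_perm hne P1
    have e1 : pymin (b.map (fun q =>
        (q.2, lmax (b.map (fun q => q.1)) - q.1).2)) = 0 := by
      have e : (b.map (fun q => (q.2, lmax (b.map (fun q => q.1)) - q.1).2)) =
          (b.map (fun q => q.1)).map (fun x => lmax (b.map (fun q => q.1)) - x) := by
        rw [List.map_map]
        rfl
      rw [e, pymin_map_const_sub hfne]
      omega
    have e2' : lmax (b.map (fun q => (q.2, lmax (b.map (fun q => q.1)) - q.1).1)) =
        lmax (b.map (fun q => q.2)) := rfl
    rw [e1, e2'] at h2
    refine h2.trans ?_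
    have e : (b.map (fun p =>
        ((p.2, lmax (b.map (fun q => q.1)) - p.1).2 - 0,
          lmax (b.map (fun q => q.2)) -
            (p.2, lmax (b.map (fun q => q.1)) - p.1).1))) =
        b.map (fun p =>
          (lmax (b.map (fun q => q.1)) - p.1, lmax (b.map (fun q => q.2)) - p.2)) := by
      congr 1
      funext p
      obtain ⟨u, v⟩ := p
      simp only [Prod.mk.injEq, and_true]
      try omega
    rw [e]
  have P3 : (R (R (R b))).Perm (b.map (fun p =>
      (lmax (b.map (fun q => q.2)) - p.2, p.1))) := by
    have h3 := R_perm_of_perm hne P2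
    have e1 : pymin (b.map (fun q =>
        (lmax (b.map (fun q => q.1)) - q.1, lmax (b.map (fun q => q.2)) - q.2).2)) = 0 := by
      have e : (b.map (fun q =>
          (lmax (b.map (fun q => q.1)) - q.1, lmax (b.map (fun q => q.2)) - q.2).2)) =
          (b.map (fun q => q.2)).map (fun x => lmax (b.map (fun q => q.2)) - x) := by
        rw [List.map_map]
        rfl
      rw [e, pymin_map_const_sub hsne]
      omega
    have e2 : lmax (b.map (fun q =>
        (lmax (b.map (fun q => q.1)) - q.1, lmax (b.map (fun q => q.2)) - q.2).1)) =
        lmax (b.map (fun q => q.1)) := by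
      have e : (b.map (fun q =>
          (lmax (b.map (fun q => q.1)) - q.1, lmax (b.map (fun q => q.2)) - q.2).1)) =
          (b.map (fun q => q.1)).map (fun x => lmax (b.map (fun q => q.1)) - x) := by
        rw [List.map_map]
        rfl
      rw [e, lmax_map_const_sub hfne, hm1]
      omega
    rw [e1, e2] at h3
    refine h3.trans ?_
    have e : (b.map (fun p =>
        ((lmax (b.map (fun q => q.1)) - p.1, lmax (b.map (fun q => q.2)) - p.2).2 - 0,
          lmax (b.map (fun q => q.1)) -
            (lmax (b.map (fun q => q.1)) - p.1, lmax (b.map (fun q => q.2)) - p.2).1))) =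
        b.map (fun p => (lmax (b.map (fun q => q.2)) - p.2, p.1)) := by
      congr 1
      funext p
      obtain ⟨u, v⟩ := p
      simp only [Prod.mk.injEq]
      try omega
    rw [e]
  have P4 : (R (R (R (R b)))).Perm b := by
    have h4 := R_perm_of_perm hne P3
    have e1 : pymin (b.map (fun q => (lmax (b.map (fun q => q.2)) - q.2, q.1).2)) = 0 := hm1
    have e2 : lmax (b.map (fun q => (lmax (b.map (fun q => q.2)) - q.2, q.1).1)) =
        lmax (b.map (fun q => q.2)) := by
      have e : (b.map (fun q => (lmax (b.map (fun q => q.2)) - q.2, q.1).1)) =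
          (b.map (fun q => q.2)).map (fun x => lmax (b.map (fun q => q.2)) - x) := by
        rw [List.map_map]
        rfl
      rw [e, lmax_map_const_sub hsne, hm2]
      omega
    rw [e1, e2] at h4
    refine h4.trans ?_
    have e : (b.map (fun p =>
        ((lmax (b.map (fun q => q.2)) - p.2, p.1).2 - 0,
          lmax (b.map (fun q => q.2)) - (lmax (b.map (fun q => q.2)) - p.2, p.1).1))) = b := by
      have hfun : (fun p : Int × Int =>
          ((lmax (b.map (fun q => q.2)) - p.2, p.1).2 - 0,
            lmax (b.map (fun q => q.2)) - (lmax (b.map (fun q => q.2)) - p.2, p.1).1)) =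
          fun p : Int × Int => p := by
        funext p
        obtain ⟨u, v⟩ := p
        simp only [Prod.mk.injEq]
        try omega
      rw [hfun, List.map_id']
    rw [e]
  exact standard_eq_of_perm P4 hpw

theorem R4_iter {b : List (Int × Int)} (h : Std b) : R^[4] b = b := R4_id h

theorem R_iter_std {b : List (Int × Int)} (h : Std b) (z : Nat) : Std (R^[z] b) := by
  induction z with
  | zero => simpa
  | succ n ih =>
    rw [Function.iterate_succ_apply']
    exact R_std ih

theorem R_iter_mod {b : List (Int × Int)} (h : Std b) (k : Nat) : R^[k] b = R^[k % 4] b := by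
  induction k using Nat.strong_induction_on with
  | _ k ih =>
    by_cases hk : k < 4
    · rw [Nat.mod_eq_of_lt hk]
    · have h4 : k = (k - 4) + 4 := by omega
      rw [h4, Function.iterate_add_apply, R4_iter h, ih (k - 4) (by omega)]
      congr 1
      omega

theorem standard_shift (b : List (Int × Int)) (a c : Int) :
    standard (b.map (fun p => (p.1 + a, p.2 + c))) = standard b := by
  rcases eq_or_ne b [] with rfl | hne
  · rfl
  · unfold standard
    have e1 : ((b.map (fun p => (p.1 + a, p.2 + c))).map (fun q => q.1)) =
        (b.map (fun q => q.1)).map (fun x => x + a) := by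
      simp only [List.map_map]
      rfl
    have e2 : ((b.map (fun p => (p.1 + a, p.2 + c))).map (fun q => q.2)) =
        (b.map (fun q => q.2)).map (fun x => x + c) := by
      simp only [List.map_map]
      rfl
    rw [e1, e2, pymin_map_add (by simpa using hne), pymin_map_add (by simpa using hne)]
    congr 1
    simp only [List.map_map]
    congr 1
    funext p
    obtain ⟨u, v⟩ := p
    simp only [Function.comp_apply, Prod.mk.injEq]
    try omega

theorem standard_rotate_eq (b : List (Int × Int)) (N : Int) :
    standard (rotate b N) = R b := by
  have e : rotate b N = (rotB b).map (fun p => (p.1 + 0, p.2 + (N - 1))) := by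
    simp only [rotate, rotB, List.map_map]
    congr 1
    funext p
    obtain ⟨u, v⟩ := p
    simp only [Function.comp_apply, Prod.mk.injEq]
    try omega
  rw [e, standard_shift]
  rfl

theorem exists_lt4_iff {g t : List (Int × Int)} :
    (∃ z < 4, g = R^[z] t) ↔ (g = t ∨ g = R t ∨ g = R (R t) ∨ g = R (R (R t))) := by
  constructor
  · rintro ⟨z, hz, rfl⟩
    interval_cases z
    · exact Or.inl rfl
    · exact Or.inr (Or.inl rfl)
    · exact Or.inr (Or.inr (Or.inl rfl))
    · exact Or.inr (Or.inr (Or.inr rfl))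
  · rintro (h | h | h | h)
    exacts [⟨0, by omega, h⟩, ⟨1, by omega, h⟩, ⟨2, by omega, h⟩, ⟨3, by omega, h⟩]

theorem tryRot_iff (N : Int) (g t : List (Int × Int)) :
    tryRot N g 4 t = true ↔ ∃ z < 4, g = R^[z] t := by
  have h5 : tryRot N g 4 t =
      (if g = t then true
       else if g = standard (rotate t N) then true
       else if g = standard (rotate (standard (rotate t N)) N) then true
       else if g = standard (rotate (standard (rotate (standard (rotate t N)) N)) N) then true
       else false) := rfl
  rw [h5]
  simp only [standard_rotate_eq]
  rw [exists_lt4_iff]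
  split_ifs <;> simp_all

theorem scanT_eq_some {N : Int} {g t : List (Int × Int)} {T : List (List (Int × Int))}
    (h : scanT N g T = some t) : t ∈ T ∧ tryRot N g 4 t = true := by
  induction T with
  | nil => simp [scanT] at h
  | cons a rest ih =>
    by_cases ha : tryRot N g 4 a
    · rw [scanT, if_pos ha] at h
      obtain rfl := Option.some.inj h
      exact ⟨List.mem_cons_self, ha⟩
    · rw [scanT, if_neg (by simpa using ha)] at h
      obtain ⟨h1, h2⟩ := ih h
      exact ⟨List.mem_cons_of_mem _ h1, h2⟩

theorem scanT_eq_none {N : Int} {g : List (Int × Int)} {T : List (List (Int × Int))}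
    (h : scanT N g T = none) : ∀ t ∈ T, tryRot N g 4 t = false := by
  induction T with
  | nil => simp
  | cons a rest ih =>
    by_cases ha : tryRot N g 4 a
    · rw [scanT, if_pos ha] at h
      cases h
    · rw [scanT, if_neg (by simpa using ha)] at h
      intro t ht
      rcases List.mem_cons.mp ht with rfl | ht
      · simpa using ha
      · exact ih h t ht

theorem flat_cons (p : Int × Int) (l : List (Int × Int)) :
    flat (p :: l) = p.1 :: p.2 :: flat l := by
  simp [flat]

theorem flat_inj {a b : List (Int × Int)} (h : flat a = flat b) : a = b := by
  induction a generalizing b with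
  | nil =>
    cases b with
    | nil => rfl
    | cons q bs => rw [flat_cons] at h; simp [flat] at h
  | cons p as ih =>
    cases b with
    | nil => rw [flat_cons] at h; simp [flat] at h
    | cons q bs =>
      rw [flat_cons, flat_cons] at h
      obtain ⟨h1, h2, h3⟩ : p.1 = q.1 ∧ p.2 = q.2 ∧ flat as = flat bs := by
        injection h with h1 h'
        injection h' with h2 h3
        exact ⟨h1, h2, h3⟩
      have hpq : p = q := by
        cases p; cases q; simp_all
      rw [hpq, ih h3]

theorem ite_min (m f : List Int) : (if f < m then f else m) = min m f := by
  rcases lt_or_ge f m with h | h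
  · rw [if_pos h, min_eq_right h.le]
  · rw [if_neg (not_lt_of_ge h), min_eq_left h]

theorem canon_eq_min4 (b : List (Int × Int)) :
    canon b = min (min (min (flat b) (flat (R b))) (flat (R (R b)))) (flat (R (R (R b)))) := by
  unfold canon
  simp only [List.foldl_cons, List.foldl_nil, ite_min]
  rfl

theorem canon_mem (b : List (Int × Int)) : ∃ a < 4, canon b = flat (R^[a] b) := by
  rw [canon_eq_min4]
  rcases min_choice (min (min (flat b) (flat (R b))) (flat (R (R b)))) (flat (R (R (R b)))) with
    h | h <;> rw [h]
  · rcases min_choice (min (flat b) (flat (R b))) (flat (R (R b))) with h2 | h2 <;> rw [h2]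
    · rcases min_choice (flat b) (flat (R b)) with h3 | h3 <;> rw [h3]
      · exact ⟨0, by omega, rfl⟩
      · exact ⟨1, by omega, rfl⟩
    · exact ⟨2, by omega, rfl⟩
  · exact ⟨3, by omega, rfl⟩

theorem canon_le (b : List (Int × Int)) {z : Nat} (hz : z < 4) : canon b ≤ flat (R^[z] b) := by
  rw [canon_eq_min4]
  interval_cases z
  · exact le_trans (min_le_left _ _) (le_trans (min_le_left _ _) (min_le_left _ _))
  · exact le_trans (min_le_left _ _) (le_trans (min_le_left _ _) (min_le_right _ _))
  · exact le_trans (min_le_left _ _) (min_le_right _ _)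
  · exact min_le_right _ _

theorem canon_eq_iff {g t : List (Int × Int)} (hg : Std g) (ht : Std t) :
    canon g = canon t ↔ ∃ z < 4, g = R^[z] t := by
  constructor
  · intro h
    obtain ⟨a, ha, hca⟩ := canon_mem g
    obtain ⟨c, hc, hcc⟩ := canon_mem t
    have hft : R^[a] g = R^[c] t := flat_inj (by rw [← hca, h, hcc])
    have hgg : g = R^[4 - a] (R^[a] g) := by
      rw [← Function.iterate_add_apply, show 4 - a + a = 4 by omega]
      exact (R4_iter hg).symm
    rw [hft, ← Function.iterate_add_apply, R_iter_mod ht] at hgg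
    exact ⟨(4 - a + c) % 4, Nat.mod_lt _ (by norm_num), hgg⟩
  · rintro ⟨z, hz, rfl⟩
    apply le_antisymm
    · obtain ⟨c, hc, hcc⟩ := canon_mem t
      have hval : canon t = flat (R^[(c + (4 - z)) % 4] (R^[z] t)) := by
        rw [hcc]
        congr 1
        rw [← R_iter_mod (R_iter_std ht z), ← Function.iterate_add_apply,
          show c + (4 - z) + z = c + 4 by omega, Function.iterate_add_apply, R4_iter ht]
      rw [hval]
      exact canon_le _ (Nat.mod_lt _ (by norm_num))
    · obtain ⟨a, ha, hca⟩ := canon_mem (R^[z] t)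
      have hval : canon (R^[z] t) = flat (R^[(a + z) % 4] t) := by
        rw [hca, ← Function.iterate_add_apply, R_iter_mod ht]
      rw [hval]
      exact canon_le _ (Nat.mod_lt _ (by norm_num))

theorem remove?_eq_some {l : List (List (Int × Int))} {v : List (Int × Int)} (h : v ∈ l) :
    PySem.List.remove? l v = some (l.erase v) := by
  induction l with
  | nil => cases h
  | cons a t ih =>
    by_cases hav : a = v
    · subst hav
      simp [PySem.List.remove?, List.idxOf?, List.findIdx?_cons]
    · have hvt : v ∈ t := by
        rcases List.mem_cons.mp h with rfl | hvt
        · exact absurd rfl hav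
        · exact hvt
      have hbeq : (a == v) = false := by simpa using hav
      have iht := ih hvt
      simp only [PySem.List.remove?, List.idxOf?] at iht ⊢
      rw [List.findIdx?_cons]
      simp only [hbeq]
      cases hidx : List.findIdx? (fun x => x == v) t with
      | none => rw [hidx] at iht; simp at iht
      | some k =>
        rw [hidx] at iht
        simp only [Option.map_some] at iht
        obtain he := Option.some.inj iht
        simp only [Option.map_some]
        rw [List.erase_cons_tail (by simp [hbeq])]
        simp [List.eraseIdx_cons_succ, he]

theorem remove_getD_eq {l : List (List (Int × Int))} {v : List (Int × Int)} (h : v ∈ l) :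
    (PySem.List.remove? l v).getD l = l.erase v := by
  rw [remove?_eq_some h]
  rfl

theorem count_canon_erase {T : List (List (Int × Int))} {v : List (Int × Int)} (hv : v ∈ T)
    (k : List Int) :
    ((T.erase v).map canon).count k + (if canon v = k then 1 else 0) =
      (T.map canon).count k := by
  have hp : (T.map canon).Perm (canon v :: (T.erase v).map canon) :=
    (List.perm_cons_erase hv).map canon
  rw [hp.count_eq, List.count_cons]
  simp [beq_iff_eq]

theorem loop_eq (N : Int) :
    ∀ (G T : List (List (Int × Int))) (cnt : PySem.Dict (List Int) Int) (ans : Int),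
    (∀ g ∈ G, Std g) → (∀ t ∈ T, Std t) →
    (∀ k, cnt.getD k 0 = ((T.map canon).count k : Int)) →
    (G.foldl (fun (s : Int × List (List (Int × Int))) g =>
      if s.2.contains g then (s.1 + (g.length : Int), (PySem.List.remove? s.2 g).getD s.2)
      else
        match scanT N g s.2 with
        | some t => (s.1 + (g.length : Int), (PySem.List.remove? s.2 t).getD s.2)
        | none => s) (ans, T)).1 =
    (G.foldl (fun (s : Int × PySem.Dict (List Int) Int) g =>
      let k := canon g
      if 0 < s.2.getD k 0 then (s.1 + (g.length : Int), s.2.insert k (s.2.getD k 0 - 1))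
      else s) (ans, cnt)).1 := by
  intro G
  induction G with
  | nil => intro T cnt ans _ _ _; rfl
  | cons g G ih =>
    intro T cnt ans hG hT hcnt
    have hg : Std g := hG g (by simp)
    have hG' : ∀ x ∈ G, Std x := fun x hx => hG x (List.mem_cons_of_mem _ hx)
    simp only [List.foldl_cons]
    by_cases hpos : 0 < ((T.map canon).count (canon g))
    · have hbpos : (0 : Int) < cnt.getD (canon g) 0 := by
        rw [hcnt]
        exact_mod_cast hpos
      have key : ∃ v, v ∈ T ∧ canon v = canon g ∧
          (if T.contains g then (ans + (g.length : Int), (PySem.List.remove? T g).getD T)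
           else
             match scanT N g T with
             | some t => (ans + (g.length : Int), (PySem.List.remove? T t).getD T)
             | none => (ans, T)) = (ans + (g.length : Int), T.erase v) := by
        by_cases hc : T.contains g
        · have hgT : g ∈ T := by simpa using hc
          exact ⟨g, hgT, rfl, by rw [if_pos hc, remove_getD_eq hgT]⟩
        · rw [if_neg hc]
          cases hscan : scanT N g T with
          | none =>
            exfalso
            obtain ⟨t, htT, hk⟩ := List.mem_map.mp (List.count_pos_iff.mp hpos)
            obtain ⟨z, hz, hgz⟩ := (canon_eq_iff hg (hT t htT)).mp hk.symm
            have hf := scanT_eq_none hscan t htT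
            have ht2 := (tryRot_iff N g t).mpr ⟨z, hz, hgz⟩
            rw [hf] at ht2
            cases ht2
          | some t =>
            obtain ⟨htT, htr⟩ := scanT_eq_some hscan
            obtain ⟨z, hz, hgz⟩ := (tryRot_iff N g t).mp htr
            refine ⟨t, htT, ((canon_eq_iff hg (hT t htT)).mpr ⟨z, hz, hgz⟩).symm, ?_⟩
            show (ans + (g.length : Int), (PySem.List.remove? T t).getD T) =
              (ans + (g.length : Int), T.erase t)
            rw [remove_getD_eq htT]
      obtain ⟨v, hvT, hvk, hstep⟩ := key
      rw [hstep, if_pos hbpos]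
      apply ih _ _ _ hG' (fun t ht => hT t (List.mem_of_mem_erase ht))
      intro k
      rw [PySem.Dict.getD_insert]
      by_cases hk : k = canon g
      · subst hk
        rw [if_pos rfl]
        have hcount := count_canon_erase hvT (canon v)
        rw [if_pos rfl] at hcount
        rw [hvk] at hcount
        rw [hcnt (canon g)]
        omega
      · rw [if_neg hk, hcnt k]
        have hcv : ¬ canon v = k := by rw [hvk]; exact fun he => hk he.symm
        have hcount := count_canon_erase hvT k
        rw [if_neg hcv] at hcount
        omega
    · have hc : ¬ (T.contains g = true) := by
        intro hcc
        exact hpos (List.count_pos_iff.mpr (List.mem_map.mpr ⟨g, by simpa using hcc, rfl⟩))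
      have hnone : scanT N g T = none := by
        cases hs : scanT N g T with
        | none => rfl
        | some t =>
          exfalso
          obtain ⟨htT, htr⟩ := scanT_eq_some hs
          obtain ⟨z, hz, hgz⟩ := (tryRot_iff N g t).mp htr
          exact hpos (List.count_pos_iff.mpr (List.mem_map.mpr
            ⟨t, htT, ((canon_eq_iff hg (hT t htT)).mpr ⟨z, hz, hgz⟩).symm⟩))
      have hbneg : ¬ (0 : Int) < cnt.getD (canon g) 0 := by
        rw [hcnt]
        exact_mod_cast hpos
      rw [if_neg hc, hnone, if_neg hbneg]
      exact ih _ _ _ hG' hT hcnt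

-- ---- extraction: every collected block is Std ----

theorem getD_set_self {α : Type} (l : List α) (i : Nat) (v d : α) (h : i < l.length) :
    (l.set i v).getD i d = v := by
  rw [List.getD_eq_getElem?_getD, List.getElem?_set_self h, Option.getD_some]

theorem getD_set_ne {α : Type} (l : List α) {i j : Nat} (v d : α) (h : i ≠ j) :
    (l.set i v).getD j d = l.getD j d := by
  rw [List.getD_eq_getElem?_getD, List.getElem?_set_ne h, ← List.getD_eq_getElem?_getD]

def dims (N : Nat) (V : List (List Bool)) : Prop :=
  V.length = N ∧ ∀ r ∈ V, r.length = N

theorem dims_visSet {N : Nat} {V : List (List Bool)} (h : dims N V) (x y : Int) :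
    dims N (visSet V x y) := by
  unfold visSet
  by_cases hx : x.toNat < V.length
  · refine ⟨by simpa using h.1, ?_⟩
    intro r hr
    rcases List.mem_or_eq_of_mem_set hr with hr | rfl
    · exact h.2 r hr
    · have hm : V.getD x.toNat [] ∈ V := by
        rw [List.getD_eq_getElem?_getD, List.getElem?_eq_getElem hx]
        exact List.getElem_mem hx
      rw [List.length_set]
      exact h.2 _ hm
  · rw [List.set_eq_of_length_le (by omega)]
    exact h

theorem visGet_visSet_self {N : Nat} {V : List (List Bool)} (h : dims N V) {x y : Int}
    (hxN : x.toNat < N) (hyN : y.toNat < N) :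
    visGet (visSet V x y) x y = true := by
  unfold visGet visSet
  have hx : x.toNat < V.length := by rw [h.1]; exact hxN
  have hm : V.getD x.toNat [] ∈ V := by
    rw [List.getD_eq_getElem?_getD, List.getElem?_eq_getElem hx]
    exact List.getElem_mem hx
  have hy : y.toNat < (V.getD x.toNat []).length := by rw [h.2 _ hm]; exact hyN
  rw [getD_set_self _ _ _ _ hx, getD_set_self _ _ _ _ hy]

theorem visGet_visSet_mono {V : List (List Bool)} {a b : Int} (x y : Int)
    (h : visGet V a b = true) : visGet (visSet V x y) a b = true := by
  unfold visGet visSet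
  unfold visGet at h
  by_cases hxl : x.toNat < V.length
  · by_cases hax : a.toNat = x.toNat
    · rw [hax] at h ⊢
      rw [getD_set_self _ _ _ _ hxl]
      by_cases hby : b.toNat = y.toNat
      · rw [hby] at h ⊢
        by_cases hyl : y.toNat < (V.getD x.toNat []).length
        · rw [getD_set_self _ _ _ _ hyl]
        · rw [List.set_eq_of_length_le (by omega)]
          exact h
      · rw [getD_set_ne _ _ _ (fun he => hby he.symm)]
        exact h
    · rw [getD_set_ne _ _ _ (fun he => hax he.symm)]
      exact h
  · rw [List.set_eq_of_length_le (by omega)]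
    exact h

-- invariant carried through the bfs loop
def binv (N : Nat) (s : List (List Bool) × List (Int × Int) × List (Int × Int)) : Prop :=
  dims N s.1 ∧ s.2.2 ≠ [] ∧ s.2.2.Nodup ∧ ∀ c ∈ s.2.2, visGet s.1 c.1 c.2 = true

theorem bfsStep_inv {N : Int} {Nn : Nat} (hN : N.toNat = Nn) (array : List (List Int))
    (check px py : Int) {s : List (List Bool) × List (Int × Int) × List (Int × Int)}
    (h : binv Nn s) : binv Nn (bfsStep N array check px py s) := by
  unfold bfsStep
  refine List.foldlRecOn dirs _ h ?_
  intro t ht d _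
  dsimp only
  split_ifs with h1 h2
  · exact ht
  · obtain ⟨hdims, hne, hnd, hvis⟩ := ht
    obtain ⟨hx0, h1'⟩ := not_or.mp h1
    obtain ⟨hy0, h1''⟩ := not_or.mp h1'
    obtain ⟨hxN, hyN⟩ := not_or.mp h1''
    refine ⟨dims_visSet hdims _ _, by simp, ?_, ?_⟩
    · have hnot : (px + d.1, py + d.2) ∉ t.2.2 := by
        intro hmem
        have hv := hvis _ hmem
        simp only at hv
        rw [h2.1] at hv
        cases hv
      refine List.Nodup.append hnd (by simp) ?_
      intro a ha hmem
      have hae : a = (px + d.1, py + d.2) := by simpa using hmem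
      subst hae
      exact hnot ha
    · intro c hc
      rcases List.mem_append.mp hc with hc | hc
      · exact visGet_visSet_mono _ _ (hvis c hc)
      · have hce : c = (px + d.1, py + d.2) := by simpa using hc
        subst hce
        exact visGet_visSet_self hdims (by omega) (by omega)
  · exact ht

theorem bfsLoop_inv {N : Int} {Nn : Nat} (hN : N.toNat = Nn) (array : List (List Int))
    (check : Int) (fuel : Nat) :
    ∀ (V : List (List Bool)) (que space : List (Int × Int)), binv Nn (V, que, space) →
    dims Nn (bfsLoop N array check fuel V que space).1 ∧
    (bfsLoop N array check fuel V que space).2 ≠ [] ∧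
    (bfsLoop N array check fuel V que space).2.Nodup := by
  induction fuel with
  | zero =>
    intro V que space h
    exact ⟨h.1, h.2.1, h.2.2.1⟩
  | succ fuel ih =>
    intro V que space h
    rcases que with _ | ⟨⟨px, py⟩, rest⟩
    · exact ⟨h.1, h.2.1, h.2.2.1⟩
    · have hstep := bfsStep_inv hN array check px py
        (s := (V, rest, space)) ⟨h.1, h.2.1, h.2.2.1, h.2.2.2⟩
      exact ih _ _ _ hstep

theorem bfs_spec {N : Int} {Nn : Nat} (hN : N.toNat = Nn) {V : List (List Bool)}
    (h : dims Nn V) {x y : Int} (hxN : x.toNat < Nn) (hyN : y.toNat < Nn)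
    (array : List (List Int)) (check : Int) :
    dims Nn (bfs x y N V array check).1 ∧ Std (standard (bfs x y N V array check).2) := by
  have hb : binv Nn (visSet V x y, [(x, y)], [(x, y)]) := by
    refine ⟨dims_visSet h x y, by simp, by simp, ?_⟩
    intro c hc
    have hce : c = (x, y) := by simpa using hc
    subst hce
    exact visGet_visSet_self h hxN hyN
  obtain ⟨h1, h2, h3⟩ := bfsLoop_inv hN array check (N.toNat * N.toNat + 2) _ _ _ hb
  refine ⟨h1, ?_⟩
  apply standard_std
  · intro h0
    have hp := PySem.List.sorted_perm
      (bfsLoop N array check (N.toNat * N.toNat + 2) (visSet V x y) [(x, y)] [(x, y)]).2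
      keyP false
    have h0' : PySem.List.sorted
        (bfsLoop N array check (N.toNat * N.toNat + 2) (visSet V x y) [(x, y)] [(x, y)]).2
        keyP = [] := h0
    rw [h0'] at hp
    exact h2 hp.symm.eq_nil
  · exact (PySem.List.sorted_perm _ _ _).nodup_iff.mpr h3

theorem blocksOf_std (board : List (List Int)) (check N : Int) :
    ∀ b ∈ blocksOf board check N, Std b := by
  unfold blocksOf
  have main := List.foldlRecOn (motive := fun (s : List (List Bool) × List (List (Int × Int))) =>
      dims N.toNat s.1 ∧ ∀ b ∈ s.2, Std b)
    (PySem.List.pyRange 0 N 1)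
    (fun s i => (PySem.List.pyRange 0 N 1).foldl (fun s j => extractStep board check N s (i, j)) s)
    (b := (List.replicate N.toNat (List.replicate N.toNat false), []))
    ⟨⟨by simp, fun r hr => by rw [List.eq_of_mem_replicate hr]; simp⟩, by simp⟩
    ?_
  · exact fun b hb => main.2 b hb
  · intro s hs i hi
    refine List.foldlRecOn (motive := fun (s : List (List Bool) × List (List (Int × Int))) =>
      dims N.toNat s.1 ∧ ∀ b ∈ s.2, Std b) _ _ hs ?_
    intro s2 hs2 j hj
    unfold extractStep
    split_ifs with hcond
    · have hi' := PySem.List.mem_pyRange_one.mp hi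
      have hj' := PySem.List.mem_pyRange_one.mp hj
      have hbfs := bfs_spec rfl hs2.1 (x := i) (y := j) (by omega) (by omega) board check
      refine ⟨hbfs.1, ?_⟩
      intro b hb
      rcases List.mem_append.mp hb with hb | hb
      · exact hs2.2 b hb
      · have hbe : b = standard (bfs i j N s2.1 board check).2 := by simpa using hb
        rw [hbe]
        exact hbfs.2
    · exact hs2

-- A's interleaved double loop is the product of the two per-board loops
theorem extract_split (game_board table : List (List Int)) (N : Int) :
    ((PySem.List.pyRange 0 N 1).foldl (fun s i =>
        (PySem.List.pyRange 0 N 1).foldl (fun s j =>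
          (extractStep game_board 0 N s.1 (i, j), extractStep table 1 N s.2 (i, j))) s)
      ((List.replicate N.toNat (List.replicate N.toNat false), []),
       (List.replicate N.toNat (List.replicate N.toNat false), []))).1.2 =
      blocksOf game_board 0 N ∧
    ((PySem.List.pyRange 0 N 1).foldl (fun s i =>
        (PySem.List.pyRange 0 N 1).foldl (fun s j =>
          (extractStep game_board 0 N s.1 (i, j), extractStep table 1 N s.2 (i, j))) s)
      ((List.replicate N.toNat (List.replicate N.toNat false), []),
       (List.replicate N.toNat (List.replicate N.toNat false), []))).2.2 =
      blocksOf table 1 N := by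
  have inner : ∀ (s : (List (List Bool) × List (List (Int × Int))) ×
        (List (List Bool) × List (List (Int × Int)))) (i : Int),
      (PySem.List.pyRange 0 N 1).foldl (fun s j =>
        (extractStep game_board 0 N s.1 (i, j), extractStep table 1 N s.2 (i, j))) s =
      ((PySem.List.pyRange 0 N 1).foldl (fun s j => extractStep game_board 0 N s (i, j)) s.1,
       (PySem.List.pyRange 0 N 1).foldl (fun s j => extractStep table 1 N s (i, j)) s.2) := by
    intro s i
    rcases s with ⟨a, b⟩
    exact PySem.List.foldl_prod_mk (fun st j => extractStep game_board 0 N st (i, j))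
      (fun st j => extractStep table 1 N st (i, j)) _ a b
  have houter : (fun (s : (List (List Bool) × List (List (Int × Int))) ×
        (List (List Bool) × List (List (Int × Int)))) (i : Int) =>
      (PySem.List.pyRange 0 N 1).foldl (fun s j =>
        (extractStep game_board 0 N s.1 (i, j), extractStep table 1 N s.2 (i, j))) s) =
      (fun s i =>
        ((PySem.List.pyRange 0 N 1).foldl (fun st j => extractStep game_board 0 N st (i, j)) s.1,
         (PySem.List.pyRange 0 N 1).foldl (fun st j => extractStep table 1 N st (i, j)) s.2)) :=
    funext fun s => funext fun i => inner s i
  rw [houter, PySem.List.foldl_prod_mk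
    (f := fun st i =>
      (PySem.List.pyRange 0 N 1).foldl (fun st j => extractStep game_board 0 N st (i, j)) st)
    (g := fun st i =>
      (PySem.List.pyRange 0 N 1).foldl (fun st j => extractStep table 1 N st (i, j)) st)]
  exact ⟨rfl, rfl⟩

-- ===== VERDICT (by name: the statement is the Claim_ definition above) =====
theorem solution_spec : Claim_equal_solution := by
  intro gb tb _ _
  show solution gb tb = solution_alt gb tb
  simp only [solution, solution_alt]
  rw [(extract_split gb tb (PySem.List.len gb)).1, (extract_split gb tb (PySem.List.len gb)).2]
  exact loop_eq _ _ _ _ _ (blocksOf_std _ _ _) (blocksOf_std _ _ _)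
    (fun k => by rw [PySem.Dict.getD_counter])
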